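-- pv_equiv track=rewrite | github.com/alexandraback/datacollection | solutions_5636311922769920_0/Python/EpicSound/d.py | solve
-- ===== SOURCE A (Python) =====
-- def offset_calc(k,c,lvl,pos):
--     if c==lvl:return pos
--     return pos*(k**(c-lvl))
--
-- def solve(k,c,s):
--     if s*c<k:return ["IMPOSSIBLE"]
--     if k<=s:return [str(i) for i in (range(1,k+1))]
--     res = []
--     remaining = list(range(k))
--     while s > 0 and len(remaining)> 0:
--         max_elimination = min(len(remaining),c)
--         pos=0
--         for i in range(1,max_elimination+1):
--             to_eliminate=remaining.pop(0)
--             pos += offset_calc(k,c,i,to_eliminate)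
--         res.append(pos)
--         s-=1
--     return [str(i+1) for i in res]
-- ===== SOURCE B (Python) =====
-- def solve(k, c, s):
--     if s * c < k:
--         return ["IMPOSSIBLE"]
--     if k <= s:
--         return [str(i) for i in range(1, k + 1)]
--     res = []
--     start = 0
--     while start < k:
--         count = min(c, k - start)
--         if count <= 0:
--             break
--         val = 0
--         for i in range(count):
--             val = val * k + (start + i)
--         res.append(val * k ** (c - count))
--         start += count
--     return [str(v + 1) for v in res]
-- ===== Notes on version B (the rewrite author's own statement) =====
-- stated objective: alternative
-- what changed: Replaced the FIFO queue of survivors and the per-element offset_calc power computation by a direct index walk over chunk boundaries, computing each chunk's value with Horner's method and a single high-alignment power per chunk.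
import Mathlib
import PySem

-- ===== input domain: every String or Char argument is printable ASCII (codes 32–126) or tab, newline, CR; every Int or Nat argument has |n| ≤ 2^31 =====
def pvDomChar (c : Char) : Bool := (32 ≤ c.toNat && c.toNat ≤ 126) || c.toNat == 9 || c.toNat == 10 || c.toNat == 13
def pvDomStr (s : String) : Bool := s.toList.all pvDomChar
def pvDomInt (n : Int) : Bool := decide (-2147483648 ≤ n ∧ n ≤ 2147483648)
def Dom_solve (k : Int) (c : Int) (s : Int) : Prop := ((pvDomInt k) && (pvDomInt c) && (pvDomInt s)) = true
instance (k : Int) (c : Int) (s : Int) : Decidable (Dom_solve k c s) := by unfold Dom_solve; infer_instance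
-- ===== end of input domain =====

-- B replaces A's FIFO queue of survivors and per-element offset_calc powers by a direct
-- chunk-by-chunk index walk with Horner evaluation and one high-alignment power per chunk
-- (objective: alternative decomposition — no queue, one power per chunk).

-- ===== PORT A =====
-- offset_calc: k**(c-lvl); solve only calls it with lvl ≤ c, so the exponent is never
-- negative and .toNat is exact on every reached call.
def offset_calc (k : Int) (c : Int) (lvl : Int) (pos : Int) : Int :=
  if c = lvl then pos else pos * k ^ (c - lvl).toNat

-- inner 'for i in range(1, max_elimination+1)' loop: fuel = max_elimination (≤ len remaining,
-- so remaining.pop(0) never hits an empty list; the [] branch is unreachable).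
def solveInnerA (k : Int) (c : Int) : Nat → Int → Int → List Int → Int × List Int
  | 0, _, pos, rem => (pos, rem)
  | _ + 1, _, pos, [] => (pos, [])  -- unreachable: pop(0) of an empty list
  | n + 1, i, pos, x :: rest => solveInnerA k c n (i + 1) (pos + offset_calc k c i x) rest

-- outer 'while s > 0 and len(remaining) > 0' loop: s decreases by one each pass, fuel = s.
def solveLoopA (k : Int) (c : Int) : Nat → List Int → List Int → List Int
  | 0, _, acc => acc
  | fuel + 1, remaining, acc =>
    if remaining.length = 0 then acc
    else
      let maxElim := min (remaining.length : Int) c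
      let pr := solveInnerA k c maxElim.toNat 1 0 remaining
      solveLoopA k c fuel pr.2 (acc ++ [pr.1])

def solve (k : Int) (c : Int) (s : Int) : List String :=
  if s * c < k then ["IMPOSSIBLE"]
  else if k ≤ s then (PySem.List.pyRange 1 (k + 1) 1).map PySem.Int.toStr
  else (solveLoopA k c s.toNat (PySem.List.pyRange 0 k 1) []).map (fun i => PySem.Int.toStr (i + 1))

-- ===== PORT B =====
-- 'for i in range(count): val = val*k + (start+i)'  (Horner)
def chunkVal (k : Int) (start : Int) (count : Nat) : Int :=
  (List.range count).foldl (fun val i => val * k + (start + Int.ofNat i)) 0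

-- 'while start < k' loop: start advances by count ≥ 1 each pass, fuel = k.
def solveLoopB (k : Int) (c : Int) : Nat → Int → List Int → List Int
  | 0, _, acc => acc
  | fuel + 1, start, acc =>
    if start < k then
      let count := min c (k - start)
      if count ≤ 0 then acc
      else
        solveLoopB k c fuel (start + count)
          (acc ++ [chunkVal k start count.toNat * k ^ (c - count).toNat])
    else acc

def solve_alt (k : Int) (c : Int) (s : Int) : List String :=
  if s * c < k then ["IMPOSSIBLE"]
  else if k ≤ s then (PySem.List.pyRange 1 (k + 1) 1).map PySem.Int.toStr
  else (solveLoopB k c k.toNat 0 []).map (fun v => PySem.Int.toStr (v + 1))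

-- ===== PRECONDITION & SPEC =====
def Spec_solve (k : Int) (c : Int) (s : Int) (out : List String) : Prop := out = solve_alt k c s
instance (k : Int) (c : Int) (s : Int) (out : List String) : Decidable (Spec_solve k c s out) := by unfold Spec_solve; infer_instance

-- ===== CLAIM (what is proved, stated in full; the proofs are below) =====
def Claim_equal_solve : Prop := ∀ (k : Int) (c : Int) (s : Int), Dom_solve k c s → Spec_solve k c s (solve k c s)

-- ===== LEMMAS AND PROOFS =====

-- Horner value, expressed recursively on the chunk seen from the front.
def hornerRec (k : Int) : Nat → Int → Int
  | 0, _ => 0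
  | m + 1, t => t * k ^ m + hornerRec k m (t + 1)

theorem chunkVal_fold (k : Int) : ∀ (m : Nat) (v t : Int),
    (List.range m).foldl (fun val i => val * k + (t + Int.ofNat i)) v
      = v * k ^ m + hornerRec k m t := by
  intro m
  induction m with
  | zero => intro v t; simp [hornerRec]
  | succ m ih =>
    intro v t
    rw [List.range_succ_eq_map, List.foldl_cons, List.foldl_map]
    have hfun : (fun (val : Int) (i : Nat) => val * k + (t + Int.ofNat (Nat.succ i)))
        = (fun (val : Int) (i : Nat) => val * k + ((t + 1) + Int.ofNat i)) := by
      funext val i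
      have : (Int.ofNat (Nat.succ i)) = Int.ofNat i + 1 := by simp [Int.ofNat_eq_natCast, Nat.cast_succ]
      rw [this]; ring
    rw [hfun, ih (v * k + (t + Int.ofNat 0)) (t + 1)]
    simp [hornerRec]; ring

theorem chunkVal_eq_horner (k : Int) (t : Int) (m : Nat) :
    chunkVal k t m = hornerRec k m t := by
  unfold chunkVal
  rw [chunkVal_fold]
  simp

theorem offset_calc_eq (k c i t : Int) (_h : i ≤ c) :
    offset_calc k c i t = t * k ^ (c - i).toNat := by
  unfold offset_calc
  split_ifs with h'
  · have : (c - i).toNat = 0 := by omega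
    simp [this]
  · rfl

-- inner loop on the range [t, k): consumes m elements, accumulating the Horner value times k^e.
theorem innerA_spec (k c : Int) : ∀ (m e : Nat) (i t pos : Int),
    1 ≤ i → i + (m : Int) + (e : Int) = c + 1 → t + (m : Int) ≤ k →
    solveInnerA k c m i pos (PySem.List.pyRange t k 1)
      = (pos + hornerRec k m t * k ^ e, PySem.List.pyRange (t + (m : Int)) k 1) := by
  intro m
  induction m with
  | zero =>
    intro e i t pos _ _ _
    simp [solveInnerA, hornerRec]
  | succ m ih =>
    intro e i t pos hi hsum ht
    have htk : t < k := by push_cast at ht ⊢; omega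
    rw [PySem.List.pyRange_one_cons htk]
    show solveInnerA k c m (i + 1) (pos + offset_calc k c i t) (PySem.List.pyRange (t + 1) k 1) = _
    rw [ih e (i + 1) (t + 1) (pos + offset_calc k c i t) (by omega)
        (by push_cast at hsum ⊢; omega) (by push_cast at ht ⊢; omega)]
    have hic : i ≤ c := by push_cast at hsum; omega
    rw [offset_calc_eq k c i t hic]
    have hexp : (c - i).toNat = m + e := by push_cast at hsum; omega
    rw [Prod.mk.injEq]
    refine ⟨?_, ?_⟩
    · rw [hexp]
      show pos + t * k ^ (m + e) + hornerRec k m (t + 1) * k ^ e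
          = pos + hornerRec k (m + 1) t * k ^ e
      simp [hornerRec, pow_add]; ring
    · congr 1; push_cast; ring

theorem solveLoopA_nil (k c : Int) (f : Nat) (acc : List Int) :
    solveLoopA k c f [] acc = acc := by
  cases f <;> simp [solveLoopA]

-- the two outer loops agree on [start, k) whenever A's fuel f satisfies f*c ≥ k - start
-- (guaranteed by the guard s*c ≥ k) and B's fuel g satisfies g ≥ k - start.
theorem loops_agree (k c : Int) (hc : 1 ≤ c) : ∀ (g f : Nat) (start : Int) (acc : List Int),
    0 ≤ start → (f : Int) * c ≥ k - start → (g : Int) ≥ k - start →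
    solveLoopA k c f (PySem.List.pyRange start k 1) acc = solveLoopB k c g start acc := by
  intro g
  induction g with
  | zero =>
    intro f start acc _ _ hg
    have hks : k ≤ start := by push_cast at hg; omega
    rw [PySem.List.pyRange_one_eq_nil hks, solveLoopA_nil]
    rfl
  | succ g ih =>
    intro f start acc hs hf hg
    by_cases hlt : start < k
    · -- one chunk is consumed
      have hf1 : 1 ≤ f := by
        by_contra h
        have : f = 0 := by omega
        subst this; simp at hf; nlinarith
      obtain ⟨f', rfl⟩ : ∃ f', f = f' + 1 := ⟨f - 1, by omega⟩
      have hlen : ((PySem.List.pyRange start k 1).length : Int) = k - start := by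
        rw [PySem.List.length_pyRange_one]; omega
      have hne : (PySem.List.pyRange start k 1).length ≠ 0 := by
        intro h; rw [h] at hlen; omega
      set count : Int := min c (k - start) with hcount
      have hc1 : 1 ≤ count := by omega
      have hck : count ≤ k - start := by omega
      have hcc : count ≤ c := by omega
      have hcastm : ((count.toNat : Int)) = count := by omega
      -- A's side
      rw [show solveLoopA k c (f' + 1) (PySem.List.pyRange start k 1) acc
          = (if (PySem.List.pyRange start k 1).length = 0 then acc
             else
              let maxElim := min ((PySem.List.pyRange start k 1).length : Int) c
              let pr := solveInnerA k c maxElim.toNat 1 0 (PySem.List.pyRange start k 1)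
              solveLoopA k c f' pr.2 (acc ++ [pr.1])) from rfl]
      rw [if_neg hne]
      have hmaxElim : min ((PySem.List.pyRange start k 1).length : Int) c = count := by
        rw [hlen, hcount, min_comm]
      simp only [hmaxElim]
      rw [innerA_spec k c count.toNat (c - count).toNat 1 start 0 (by omega)
          (by omega) (by omega)]
      -- B's side
      rw [show solveLoopB k c (g + 1) start acc
          = (if start < k then
              (if min c (k - start) ≤ 0 then acc
               else solveLoopB k c g (start + min c (k - start))
                (acc ++ [chunkVal k start (min c (k - start)).toNat
                          * k ^ (c - min c (k - start)).toNat]))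
             else acc) from rfl]
      rw [if_pos hlt, if_neg (by omega)]
      rw [chunkVal_eq_horner]
      rw [← hcount]
      simp only [hcastm, zero_add]
      rw [ih f' (start + count) (acc ++ [hornerRec k count.toNat start * k ^ (c - count).toNat])
          (by omega)
          (by push_cast at hf ⊢
              by_cases h : c ≤ k - start
              · have hcv : count = c := by omega
                nlinarith
              · have hcv : count = k - start := by omega
                nlinarith)
          (by push_cast at hg ⊢; omega)]
    · -- start ≥ k: both loops terminate
      have hks : k ≤ start := by omega
      rw [PySem.List.pyRange_one_eq_nil hks, solveLoopA_nil]
      show acc = solveLoopB k c (g + 1) start acc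
      simp [solveLoopB, hlt]

-- ===== VERDICT (by name: the statement is the Claim_ definition above) =====
theorem solve_spec : Claim_equal_solve := by
  intro k c s _
  unfold Spec_solve solve solve_alt
  split_ifs with h1 h2
  · rfl
  · rfl
  · -- main branch: s*c ≥ k and s < k
    simp only [not_lt, not_le] at h1 h2
    congr 1
    by_cases hk : k ≤ 0
    · -- k ≤ 0: both loops produce []
      rw [PySem.List.pyRange_one_eq_nil hk, solveLoopA_nil]
      have : k.toNat = 0 := by omega
      rw [this]
      rfl
    · by_cases hc : c ≤ 0
      · -- c ≤ 0 with k ≥ 1 forces s < 0: A's fuel is 0, B breaks at once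
        have hs0 : s < 0 := by nlinarith [h1]
        have : s.toNat = 0 := by omega
        rw [this]
        show ([] : List Int) = solveLoopB k c k.toNat 0 []
        obtain ⟨n, hn⟩ : ∃ n, k.toNat = n + 1 := ⟨k.toNat - 1, by omega⟩
        rw [hn]
        show ([] : List Int)
            = (if (0 : Int) < k then
                (if min c (k - 0) ≤ 0 then ([] : List Int)
                 else solveLoopB k c n (0 + min c (k - 0))
                  ([] ++ [chunkVal k 0 (min c (k - 0)).toNat * k ^ (c - min c (k - 0)).toNat]))
               else [])
        rw [if_pos (show (0:Int) < k by omega), if_pos (show min c (k - 0) ≤ 0 by omega)]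
      · -- k ≥ 1, c ≥ 1: s ≥ 1 and the chunk lemma applies
        have hs1 : 1 ≤ s := by nlinarith [h1]
        apply loops_agree k c (by omega) k.toNat s.toNat 0 [] le_rfl
          (by have hcast : ((s.toNat : Int)) = s := by omega
              rw [hcast]; linarith)
          (by omega)
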